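-- pv_equiv track=rewrite | github.com/julesbertrand/LiterablyInsightProject | literacy_score/dataset.py | get_errors_dict
-- ===== SOURCE A (Python) =====
-- def get_errors_dict(differ_list):
--     """ computes number of correct, added, removed, replaced words in
--     the difflib differ list and computes the list of replaced words detected
--     Used in self.compute_features()
--     """
--     counter = 0
--     errors_dict = {'prompt': [], 'transcript': []}
--     skip_next = 0
--     n = len(differ_list)
--     add = 0
--     sub = 0
--     for i, word in enumerate(differ_list):
--         if skip_next > 0:
--             skip_next -= 1
--             pass  # when the word has already been added to the error dict
--         if word[0] == " ":
--             counter += 1  # + 1 if word correct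
--         elif i < n - 2:  # keep track of errors and classify them later
--             if word[0] == "+":
--                 add += 1
--             elif word[0] == "-":
--                 sub += 1
--             j = 1
--             while i+j < n and differ_list[i + j][0] == "?":  # account for ? in skip_next
--                 j += 1
--             plus_minus = (word[0] == "+" and differ_list[i + j][0] == "-")
--             minus_plus = (word[0] == "-" and differ_list[i + j][0] == "+")
--             skip_next = (plus_minus or minus_plus) * j
--             if plus_minus:
--                 errors_dict['prompt'] += [word.replace("+ ", "")]
--                 errors_dict['transcript'] += [differ_list[i + j].replace("- ", "")]
--             elif minus_plus:
--                 errors_dict['prompt'] += [word.replace("- ", "")]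
--                 errors_dict['transcript'] += [differ_list[i + j].replace("+ ", "")]
--     replaced = len(errors_dict['prompt'])
--     return counter, add, sub, replaced, errors_dict
-- ===== SOURCE B (Python) =====
-- def get_errors_dict(differ_list):
--     n = len(differ_list)
--     # backward pass: nxt[i] = first index j > i with differ_list[j][0] != '?', else n
--     nxt = [n] * n
--     k = n
--     for i in range(n - 1, -1, -1):
--         nxt[i] = k
--         if differ_list[i][0] != '?':
--             k = i
--     counter = 0
--     add = 0
--     sub = 0
--     prompt = []
--     transcript = []
--     for i, word in enumerate(differ_list):
--         c = word[0]
--         if c == ' ':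
--             counter += 1
--         elif i < n - 2 and (c == '+' or c == '-'):
--             if c == '+':
--                 add += 1
--             else:
--                 sub += 1
--             partner = differ_list[nxt[i]]
--             d = partner[0]
--             if c == '+' and d == '-':
--                 prompt.append(word.replace('+ ', ''))
--                 transcript.append(partner.replace('- ', ''))
--             elif c == '-' and d == '+':
--                 prompt.append(word.replace('- ', ''))
--                 transcript.append(partner.replace('+ ', ''))
--     return counter, add, sub, len(prompt), {'prompt': prompt, 'transcript': transcript}
-- ===== Notes on version B (the rewrite author's own statement) =====
-- stated objective: alternative
-- what changed: Replaces A's per-element forward while-scan over '?' lines and the inert skip_next bookkeeping by a next-non-'?' index table precomputed in one backward pass, then a single forward pass using table lookups.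
import Mathlib
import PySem

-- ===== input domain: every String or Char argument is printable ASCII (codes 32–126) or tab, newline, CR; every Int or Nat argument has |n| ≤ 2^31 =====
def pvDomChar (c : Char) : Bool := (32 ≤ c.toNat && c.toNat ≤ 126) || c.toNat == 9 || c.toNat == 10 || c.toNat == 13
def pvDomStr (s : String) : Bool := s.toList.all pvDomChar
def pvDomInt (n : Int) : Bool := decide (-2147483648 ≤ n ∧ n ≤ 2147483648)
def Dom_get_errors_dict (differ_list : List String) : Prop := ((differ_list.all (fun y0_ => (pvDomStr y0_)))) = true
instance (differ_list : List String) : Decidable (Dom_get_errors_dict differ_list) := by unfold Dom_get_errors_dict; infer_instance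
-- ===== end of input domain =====

-- B replaces A's per-element while-scan over '?' lines (and the inert skip_next bookkeeping)
-- by a precomputed next-non-'?' index table built in one backward pass; objective: alternative/simpler.
-- Equivalence is over the return value; neither version mutates its argument.

-- ===== PORT A =====
-- word[0] as a Char; the default ' ' is only reached on the empty string, excluded by Pre_
def pvHd (s : String) : Char := (PySem.Str.pyGet? s 0).getD ' '

-- the inner 'while i+j < n and differ_list[i+j][0] == "?": j += 1'
def pvScanA (l : List String) (n i j : Int) : Int :=
  if h : i + j < n ∧ pvHd (PySem.List.pyGetD l (i + j) "") = '?' then pvScanA l n i (j + 1)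
  else j
termination_by (n - (i + j)).toNat
decreasing_by omega

-- one iteration of A's for-loop; state = (counter, errors_dict, skip_next, add, sub)
def pvStepA (l : List String) (n : Int)
    (st : Int × PySem.Dict String (List String) × Int × Int × Int) (pr : Int × String) :
    Int × PySem.Dict String (List String) × Int × Int × Int :=
  let counter := st.1; let ed := st.2.1; let skip := st.2.2.1
  let add := st.2.2.2.1; let sub := st.2.2.2.2
  let i := pr.1; let word := pr.2
  let skip := if skip > 0 then skip - 1 else skip
  if pvHd word = ' ' then (counter + 1, ed, skip, add, sub)
  else if i < n - 2 then
    let add := if pvHd word = '+' then add + 1 else add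
    let sub := if pvHd word = '+' then sub else if pvHd word = '-' then sub + 1 else sub
    let j := pvScanA l n i 1
    -- 'differ_list[i+j]': pyGetD's default "" is only reached where Python raises IndexError (outside Pre_)
    let pm := pvHd word = '+' ∧ pvHd (PySem.List.pyGetD l (i + j) "") = '-'
    let mp := pvHd word = '-' ∧ pvHd (PySem.List.pyGetD l (i + j) "") = '+'
    let skip := if pm ∨ mp then j else 0
    if pm then
      (counter,
        (ed.modify "prompt" [] (· ++ [PySem.Str.replace word "+ " ""])).modify "transcript" []
          (· ++ [PySem.Str.replace (PySem.List.pyGetD l (i + j) "") "- " ""]),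
        skip, add, sub)
    else if mp then
      (counter,
        (ed.modify "prompt" [] (· ++ [PySem.Str.replace word "- " ""])).modify "transcript" []
          (· ++ [PySem.Str.replace (PySem.List.pyGetD l (i + j) "") "+ " ""]),
        skip, add, sub)
    else (counter, ed, skip, add, sub)
  else (counter, ed, skip, add, sub)

def get_errors_dict (differ_list : List String) :
    Int × Int × Int × Int × (List (String × List String)) :=
  let n := PySem.List.len differ_list
  let fin := (PySem.List.enumerate differ_list).foldl (pvStepA differ_list n)
    (0, PySem.Dict.ofList [("prompt", []), ("transcript", [])], 0, 0, 0)
  (fin.1, fin.2.2.2.1, fin.2.2.2.2, PySem.List.len (fin.2.1.getD "prompt" []), fin.2.1.items)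

-- ===== PORT B =====
-- backward pass 'for i in range(n-1,-1,-1): nxt[i] = k; if differ_list[i][0] != "?": k = i';
-- each cell is written exactly once, so building the list by consing front-to-back is exact
def pvNxtB (l : List String) : List Int :=
  (((List.range l.length).reverse).foldl
    (fun (st : Int × List Int) i =>
      (if pvHd (l.getD i "") ≠ '?' then (i : Int) else st.1, st.1 :: st.2))
    ((l.length : Int), [])).2

-- one iteration of B's forward loop; state = (counter, add, sub, prompt, transcript)
def pvStepB (l : List String) (n : Int) (nxt : List Int)
    (st : Int × Int × Int × List String × List String) (pr : Int × String) :
    Int × Int × Int × List String × List String :=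
  let counter := st.1; let add := st.2.1; let sub := st.2.2.1
  let prompt := st.2.2.2.1; let transcript := st.2.2.2.2
  let i := pr.1; let word := pr.2
  let c := pvHd word
  if c = ' ' then (counter + 1, add, sub, prompt, transcript)
  else if i < n - 2 ∧ (c = '+' ∨ c = '-') then
    let add2 := if c = '+' then add + 1 else add
    let sub2 := if c = '+' then sub else sub + 1
    -- 'differ_list[nxt[i]]': default "" only reached where Python raises IndexError (outside Pre_)
    let partner := PySem.List.pyGetD l (PySem.List.pyGetD nxt i n) ""
    let d := pvHd partner
    if c = '+' ∧ d = '-' then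
      (counter, add2, sub2, prompt ++ [PySem.Str.replace word "+ " ""],
        transcript ++ [PySem.Str.replace partner "- " ""])
    else if c = '-' ∧ d = '+' then
      (counter, add2, sub2, prompt ++ [PySem.Str.replace word "- " ""],
        transcript ++ [PySem.Str.replace partner "+ " ""])
    else (counter, add2, sub2, prompt, transcript)
  else st

def get_errors_dict_alt (differ_list : List String) :
    Int × Int × Int × Int × (List (String × List String)) :=
  let n := PySem.List.len differ_list
  let nxt := pvNxtB differ_list
  let fin := (PySem.List.enumerate differ_list).foldl (pvStepB differ_list n nxt)
    (0, 0, 0, [], [])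
  (fin.1, fin.2.1, fin.2.2.1, PySem.List.len fin.2.2.2.1,
    [("prompt", fin.2.2.2.1), ("transcript", fin.2.2.2.2)])

-- ===== PRECONDITION & SPEC =====
-- Pre_ excludes exactly the inputs where Python A raises IndexError: an empty string (word[0]),
-- or a '+'/'-' line at position i < n-2 followed only by '?' lines (the scan then indexes differ_list[n]).
def Pre_get_errors_dict (differ_list : List String) : Prop :=
  "" ∉ differ_list ∧
  ∀ i < differ_list.length, i + 2 < differ_list.length →
    (pvHd (differ_list.getD i "") = '+' ∨ pvHd (differ_list.getD i "") = '-') →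
    ∃ j < differ_list.length, i < j ∧ pvHd (differ_list.getD j "") ≠ '?'
instance (differ_list : List String) : Decidable (Pre_get_errors_dict differ_list) := by
  unfold Pre_get_errors_dict; infer_instance

def pvWitness_get_errors_dict : List String := ["- a", "+ b", "  c", "  d"]

def Spec_get_errors_dict (differ_list : List String) (out : Int × Int × Int × Int × (List (String × List String))) : Prop := out = get_errors_dict_alt differ_list
instance (differ_list : List String) (out : Int × Int × Int × Int × (List (String × List String))) : Decidable (Spec_get_errors_dict differ_list out) := by
  unfold Spec_get_errors_dict
  haveI : DecidableEq (Int × List (String × List String)) := instDecidableEqProd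
  haveI : DecidableEq (Int × Int × List (String × List String)) := instDecidableEqProd
  haveI : DecidableEq (Int × Int × Int × List (String × List String)) := instDecidableEqProd
  haveI : DecidableEq (Int × Int × Int × Int × List (String × List String)) := instDecidableEqProd
  infer_instance

-- ===== CLAIM (what is proved, stated in full; the proofs are below) =====
def Claim_equal_get_errors_dict : Prop := ∀ (differ_list : List String), Dom_get_errors_dict differ_list → Pre_get_errors_dict differ_list → Spec_get_errors_dict differ_list (get_errors_dict differ_list)

-- ===== LEMMAS AND PROOFS =====

-- first index m' ≥ m with differ_list[m'][0] ≠ '?' (capped at l.length)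
def pvNq (l : List String) (m : Nat) : Nat :=
  if h : m < l.length ∧ pvHd (l.getD m "") = '?' then pvNq l (m + 1) else m
termination_by l.length - m
decreasing_by omega

lemma pvNq_len (l : List String) : pvNq l l.length = l.length := by
  rw [pvNq]; simp

lemma pvScanA_eq (l : List String) : ∀ fuel k j : Nat, l.length - (k + j) ≤ fuel →
    pvScanA l (PySem.List.len l) (k : Int) (j : Int) = ((pvNq l (k + j) : Int)) - k := by
  intro fuel
  induction fuel with
  | zero =>
    intro k j h
    have hge : l.length ≤ k + j := by omega
    rw [pvScanA, pvNq]
    have hc1 : ¬(((k : Int) + (j : Int) < PySem.List.len l) ∧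
        pvHd (PySem.List.pyGetD l ((k : Int) + (j : Int)) "") = '?') := by
      rintro ⟨h1, -⟩
      rw [PySem.List.len_eq] at h1
      omega
    rw [dif_neg hc1, dif_neg (by rintro ⟨h1, -⟩; omega)]
    omega
  | succ fuel ih =>
    intro k j h
    have hcast : (k : Int) + (j : Int) = ((k + j : Nat) : Int) := by push_cast; ring
    by_cases hc : (k + j < l.length ∧ pvHd (l.getD (k + j) "") = '?')
    · rw [pvScanA, pvNq]
      have hcA : ((k : Int) + (j : Int) < PySem.List.len l) ∧
          pvHd (PySem.List.pyGetD l ((k : Int) + (j : Int)) "") = '?' := by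
        rw [hcast, PySem.List.pyGetD_natCast, PySem.List.len_eq]
        exact ⟨by exact_mod_cast hc.1, hc.2⟩
      rw [dif_pos hcA, dif_pos hc]
      have hj1 : (j : Int) + 1 = ((j + 1 : Nat) : Int) := by push_cast; ring
      rw [hj1, ih k (j + 1) (by omega)]
      have : k + (j + 1) = k + j + 1 := by omega
      rw [this]
    · rw [pvScanA, pvNq]
      have hcA : ¬(((k : Int) + (j : Int) < PySem.List.len l) ∧
          pvHd (PySem.List.pyGetD l ((k : Int) + (j : Int)) "") = '?') := by
        rw [hcast, PySem.List.pyGetD_natCast, PySem.List.len_eq]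
        rintro ⟨h1, h2⟩
        exact hc ⟨by exact_mod_cast h1, h2⟩
      rw [dif_neg hcA, dif_neg hc]
      omega

lemma pvNxtB_fold (l : List String) : ∀ (m : Nat), m ≤ l.length → ∀ (acc : List Int),
    ((List.range m).reverse).foldl
      (fun (st : Int × List Int) i =>
        (if pvHd (l.getD i "") ≠ '?' then (i : Int) else st.1, st.1 :: st.2))
      ((pvNq l m : Int), acc)
    = ((pvNq l 0 : Int), (List.range m).map (fun t => ((pvNq l (t + 1) : Int))) ++ acc) := by
  intro m
  induction m with
  | zero => intro _ acc; simp
  | succ m ih =>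
    intro hm acc
    rw [List.range_succ, List.reverse_append]
    simp only [List.reverse_singleton, List.singleton_append, List.foldl_cons]
    have hnq : pvNq l m = if pvHd (l.getD m "") = '?' then pvNq l (m + 1) else m := by
      rw [pvNq]
      by_cases hq : pvHd (l.getD m "") = '?'
      · rw [dif_pos ⟨by omega, hq⟩, if_pos hq]
      · rw [dif_neg (by rintro ⟨-, h2⟩; exact hq h2), if_neg hq]
    have hfst : (if pvHd (l.getD m "") ≠ '?' then (m : Int) else ((pvNq l (m + 1) : Int)))
        = ((pvNq l m : Int)) := by
      rw [hnq]
      by_cases hq : pvHd (l.getD m "") = '?'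
      · simp
      · simp
    rw [hfst, ih (by omega) (((pvNq l (m + 1) : Int)) :: acc)]
    simp

lemma pvNxtB_eq (l : List String) :
    pvNxtB l = (List.range l.length).map (fun t => ((pvNq l (t + 1) : Int))) := by
  unfold pvNxtB
  have h0 : ((l.length : Int), ([] : List Int)) = (((pvNq l l.length : Int)), ([] : List Int)) := by
    rw [pvNq_len]
  rw [h0, pvNxtB_fold l l.length le_rfl []]
  simp

-- B-state + a skip_next value, reassembled as an A-state
def pvToA (sb : Int × Int × Int × List String × List String) (skip : Int) :
    Int × PySem.Dict String (List String) × Int × Int × Int :=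
  (sb.1, PySem.Dict.mk [("prompt", sb.2.2.2.1), ("transcript", sb.2.2.2.2)], skip, sb.2.1, sb.2.2.1)

lemma pvStep_eq (l : List String) (sb : Int × Int × Int × List String × List String)
    (skip : Int) (k : Nat) (hk : k < l.length) (w : String) :
    ∃ skip', pvStepA l (PySem.List.len l) (pvToA sb skip) ((k : Int), w) =
      pvToA (pvStepB l (PySem.List.len l) (pvNxtB l) sb ((k : Int), w)) skip' := by
  by_cases hsp : pvHd w = ' '
  · exact ⟨if skip > 0 then skip - 1 else skip, by simp [pvStepA, pvStepB, pvToA, hsp]⟩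
  · by_cases hlt : (k : Int) < PySem.List.len l - 2
    · have hj : pvScanA l (PySem.List.len l) (k : Int) 1 = ((pvNq l (k + 1) : Int)) - k := by
        have := pvScanA_eq l l.length k 1 (by omega)
        simpa using this
      have hidx : (k : Int) + (((pvNq l (k + 1) : Int)) - k) = ((pvNq l (k + 1) : Int)) := by ring
      have hnxt : PySem.List.pyGetD (pvNxtB l) ((k : Int)) (PySem.List.len l)
          = ((pvNq l (k + 1) : Int)) := by
        rw [pvNxtB_eq, PySem.List.pyGetD_natCast, PySem.List.getD_map_range _ _ _ _ hk]
      rw [PySem.List.len_eq] at hlt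
      simp only [PySem.List.len_eq, PySem.List.pyGetD_natCast, List.getD_eq_getElem?_getD]
        at hj hnxt
      by_cases hp : pvHd w = '+'
      · by_cases hd : pvHd (l[pvNq l (k + 1)]?.getD "") = '-'
        · refine ⟨((pvNq l (k + 1) : Int)) - k, ?_⟩
          simp [pvStepA, pvStepB, pvToA, hlt, hp, hj, hnxt, hd,
            PySem.Dict.modify, PySem.Dict.insert, PySem.Dict.getD, PySem.Dict.get?]
        · refine ⟨0, ?_⟩
          simp [pvStepA, pvStepB, pvToA, hlt, hp, hj, hnxt, hd]
      · by_cases hm : pvHd w = '-'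
        · by_cases hd : pvHd (l[pvNq l (k + 1)]?.getD "") = '+'
          · refine ⟨((pvNq l (k + 1) : Int)) - k, ?_⟩
            simp [pvStepA, pvStepB, pvToA, hlt, hm, hj, hnxt, hd,
              PySem.Dict.modify, PySem.Dict.insert, PySem.Dict.getD, PySem.Dict.get?]
          · refine ⟨0, ?_⟩
            simp [pvStepA, pvStepB, pvToA, hlt, hm, hj, hnxt, hd]
        · refine ⟨0, ?_⟩
          simp [pvStepA, pvStepB, pvToA, hsp, hlt, hp, hm]
    · rw [PySem.List.len_eq] at hlt
      exact ⟨if skip > 0 then skip - 1 else skip, by simp [pvStepA, pvStepB, pvToA, hsp, hlt]⟩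

lemma pvFold_eq (l : List String) : ∀ (as_ : List (Int × String)),
    (∀ pr ∈ as_, ∃ k : Nat, k < l.length ∧ pr.1 = (k : Int)) →
    ∀ sb skip, ∃ skip',
      as_.foldl (pvStepA l (PySem.List.len l)) (pvToA sb skip) =
      pvToA (as_.foldl (pvStepB l (PySem.List.len l) (pvNxtB l)) sb) skip' := by
  intro as_
  induction as_ with
  | nil => intro _ sb skip; exact ⟨skip, rfl⟩
  | cons pr rest ih =>
    intro h sb skip
    obtain ⟨k, hk, hpr⟩ := h pr (List.mem_cons_self)
    obtain ⟨s1, h1⟩ := pvStep_eq l sb skip k hk pr.2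
    rw [List.foldl_cons, List.foldl_cons]
    have hpr' : pr = ((k : Int), pr.2) := by cases pr; simp_all
    rw [hpr', h1]
    exact ih (fun q hq => h q (List.mem_cons_of_mem _ hq)) _ s1

-- ===== VERDICT (by name: the statement is the Claim_ definition above) =====
theorem get_errors_dict_spec : Claim_equal_get_errors_dict := by
  intro l _ _
  simp only [Spec_get_errors_dict, get_errors_dict, get_errors_dict_alt]
  have hmem : ∀ pr ∈ PySem.List.enumerate l, ∃ k : Nat, k < l.length ∧ pr.1 = (k : Int) := by
    intro pr hpr
    obtain ⟨k, hk, rfl⟩ := (PySem.List.mem_enumerate_iff l 0 pr).1 hpr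
    exact ⟨k, hk, by simp⟩
  obtain ⟨skip', hf⟩ := pvFold_eq l (PySem.List.enumerate l) hmem (0, 0, 0, [], []) 0
  have h0 : (pvToA (0, 0, 0, [], []) 0) =
      ((0 : Int), PySem.Dict.ofList [("prompt", []), ("transcript", [])], (0 : Int), (0 : Int), (0 : Int)) := rfl
  rw [← h0, hf]
  simp [pvToA, PySem.Dict.getD, PySem.Dict.get?]
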